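-- pv_equiv track=rewrite | github.com/JDuffy135/Minesweeper-Bot-Python | subsetElimination.py | return_subsets
-- ===== SOURCE A (Python) =====
-- def return_subsets(gameboard, col_x_coords, row_y_coords, tile) -> list[set]:
--     # creating subsets of size 1 for each bordering unopened tile
--     subset_list = []
--     for c in range(tile[0] - 1, tile[0] + 2):
--         for r in range(tile[1] - 1, tile[1] + 2):
--             if (c >= 0 and c < len(col_x_coords)) and (r >= 0 and r < len(row_y_coords)):
--                 if gameboard[r][c] == -1:
--                     cur_subset = set()
--                     cur_subset.add((c, r))
--                     subset_list.append(cur_subset)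
--
--     # merging subsets with adjacent tiles (if multiple subsets exist)
--     index = 0
--     current_comparison_index = 1
--     while index < len(subset_list) - 1:
--         break_flag = 0
--         while current_comparison_index < len(subset_list):
--             for t in subset_list[index]:
--                 if break_flag == 1:
--                     break
--                 for cmp_t in subset_list[current_comparison_index]:
--                     if cmp_t == (t[0] + 1, t[1]) or cmp_t == (t[0] - 1, t[1]) or cmp_t == (t[0], t[1] + 1) or cmp_t == (t[0], t[1] - 1):
--                         # if an adjacent tile is found between 2 subsets, we update the set at subset_list[index] to include all the
--                         # items from the comparison subset, and consequently delete the comparison subset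
--                         break_flag = 1
--                         break
--             # INNER LOOP: check if break from inner while loop or to continue to next comparison subset
--             if break_flag == 1:
--                 subset_list[index].update(subset_list[current_comparison_index])
--                 subset_list.pop(current_comparison_index)
--                 break
--             else:
--                 current_comparison_index = current_comparison_index + 1
--         # OUTTER LOOP: check if subsets were merged
--         if break_flag == 1:
--             # restart from beginning if subsets were merged
--             index = 0
--             current_comparison_index = 1
--         else:
--             # start process from the next index if no subsets were merged
--             index = index + 1
--             current_comparison_index = index + 1
--
--     return subset_list
-- ===== SOURCE B (Python) =====
-- # B: instead of merging singleton subsets pairwise with restart-from-zero, work on the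
-- # 3x3 stencil in tile-relative offsets and grow each connected group directly from its
-- # seed, repeatedly absorbing the first remaining tile adjacent to the group.
-- OFFSETS = [(-1, -1), (-1, 0), (-1, 1), (0, -1), (0, 0), (0, 1), (1, -1), (1, 0), (1, 1)]
--
-- def return_subsets(gameboard, col_x_coords, row_y_coords, tile):
--     t0, t1 = tile[0], tile[1]
--     rel = []
--     for dc, dr in OFFSETS:
--         c, r = t0 + dc, t1 + dr
--         if 0 <= c < len(col_x_coords) and 0 <= r < len(row_y_coords) and gameboard[r][c] == -1:
--             rel.append((dc, dr))
--     used = set()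
--     comps = []
--     for seed in rel:
--         if seed in used:
--             continue
--         comp = [seed]
--         used.add(seed)
--         while True:
--             nxt = None
--             for t in rel:
--                 if t not in used and ((t[0] + 1, t[1]) in comp or (t[0] - 1, t[1]) in comp
--                                       or (t[0], t[1] + 1) in comp or (t[0], t[1] - 1) in comp):
--                     nxt = t
--                     break
--             if nxt is None:
--                 break
--             comp.append(nxt)
--             used.add(nxt)
--         comps.append(comp)
--     return [{(t0 + dc, t1 + dr) for (dc, dr) in comp} for comp in comps]
-- ===== Notes on version B (the rewrite author's own statement) =====
-- stated objective: simpler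
-- what changed: B drops A's restart-from-zero pairwise merging of singleton subsets (repeated set-vs-set adjacency scans with pop and index reset) and instead collects the bordering offsets of the 3x3 stencil once and grows each connected group directly from its seed by repeatedly absorbing the first remaining adjacent tile.
import Mathlib
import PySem

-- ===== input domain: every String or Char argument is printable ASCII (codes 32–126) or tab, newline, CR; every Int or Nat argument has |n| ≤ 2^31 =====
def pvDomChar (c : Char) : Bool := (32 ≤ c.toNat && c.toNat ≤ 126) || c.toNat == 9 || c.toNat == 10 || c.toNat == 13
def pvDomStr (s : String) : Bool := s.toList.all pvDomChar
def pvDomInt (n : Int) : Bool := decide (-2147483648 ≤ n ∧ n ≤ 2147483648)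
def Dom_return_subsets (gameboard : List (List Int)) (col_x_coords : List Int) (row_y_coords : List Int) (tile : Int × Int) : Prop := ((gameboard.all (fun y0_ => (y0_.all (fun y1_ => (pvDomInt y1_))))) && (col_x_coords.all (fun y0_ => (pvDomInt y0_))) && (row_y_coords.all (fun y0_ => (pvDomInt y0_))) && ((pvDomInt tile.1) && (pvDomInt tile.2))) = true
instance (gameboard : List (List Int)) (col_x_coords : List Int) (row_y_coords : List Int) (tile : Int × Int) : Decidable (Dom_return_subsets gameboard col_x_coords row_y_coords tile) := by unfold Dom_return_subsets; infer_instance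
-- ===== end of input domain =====

-- B replaces A's restart-from-zero pairwise subset merging by growing each connected group
-- directly from its seed over the 3x3 stencil in tile-relative offsets (objective: simpler).

-- shared leaf helper: the test both Pythons perform on a board cell
-- ('0 <= c < len(col_x_coords) and 0 <= r < len(row_y_coords) and gameboard[r][c] == -1';
-- pyGet? = none models the IndexError case, excluded by Pre_)
def pvBordering (gameboard : List (List Int)) (col_x_coords : List Int) (row_y_coords : List Int) (c r : Int) : Bool :=
  decide (0 ≤ c) && decide (c < (col_x_coords.length : Int)) &&
  decide (0 ≤ r) && decide (r < (row_y_coords.length : Int)) &&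
  (((PySem.List.pyGet? gameboard r).bind (fun row => PySem.List.pyGet? row c)) == some (-1))

-- ===== PORT A =====
-- 'for t in subset_list[index]: for cmp_t in …' existence test (order-independent)
def pvAdjAny (S T : List (Int × Int)) : Bool :=
  S.any (fun t => T.any (fun u =>
    u == (t.1 + 1, t.2) || u == (t.1 - 1, t.2) || u == (t.1, t.2 + 1) || u == (t.1, t.2 - 1)))

-- the inner 'while current_comparison_index < len(subset_list)' scan for the first merge
-- partner; the countdown k = sl.length - cci makes the recursion structural
def pvFindMergeAux (sl : List (List (Int × Int))) (idx : Nat) : Nat → Nat → Option Nat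
  | 0, _ => none
  | k + 1, cci =>
    if pvAdjAny (sl.getD idx []) (sl.getD cci []) then some cci else pvFindMergeAux sl idx k (cci + 1)

def pvFindMerge (sl : List (List (Int × Int))) (idx : Nat) (cci : Nat) : Option Nat :=
  pvFindMergeAux sl idx (sl.length - cci) cci

-- the outer 'while index < len(subset_list) - 1' loop (fuel (n+1)^2 bounds its iteration count:
-- at most n merges, each preceded by at most n index increments)
def pvMergeLoop : Nat → List (List (Int × Int)) → Nat → List (List (Int × Int))
  | 0, sl, _ => sl
  | f + 1, sl, index =>
    if index + 1 < sl.length then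
      match pvFindMerge sl index (index + 1) with
      | some j =>
          pvMergeLoop f (((sl.set index (PySem.Set.update (sl.getD index []) (sl.getD j []))).eraseIdx j)) 0
      | none => pvMergeLoop f sl (index + 1)
    else sl

def return_subsets (gameboard : List (List Int)) (col_x_coords : List Int) (row_y_coords : List Int) (tile : Int × Int) : List (List (Int × Int)) :=
  let sl := (PySem.List.pyRange (tile.1 - 1) (tile.1 + 2) 1).foldl (fun acc c =>
      (PySem.List.pyRange (tile.2 - 1) (tile.2 + 2) 1).foldl (fun acc r =>
        if pvBordering gameboard col_x_coords row_y_coords c r then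
          acc ++ [PySem.Set.add PySem.Set.empty (c, r)]
        else acc) acc) []
  pvMergeLoop ((sl.length + 1) * (sl.length + 1)) sl 0

-- ===== PORT B =====
def pvOffsets : List (Int × Int) := [(-1,-1),(-1,0),(-1,1),(0,-1),(0,0),(0,1),(1,-1),(1,0),(1,1)]

-- 'for t in rel: if t not in used and <a 4-neighbor of t in comp>: …; break'
def pvFindNext (rel : List (Int × Int)) (used comp : List (Int × Int)) : Option (Int × Int) :=
  rel.find? (fun t => !(PySem.Set.contains used t) &&
    (comp.contains (t.1 + 1, t.2) || comp.contains (t.1 - 1, t.2) ||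
     comp.contains (t.1, t.2 + 1) || comp.contains (t.1, t.2 - 1)))

-- the 'while True' growth loop (each round adds one fresh tile of rel, so |rel|+1 fuel suffices)
def pvGrow : Nat → List (Int × Int) → List (Int × Int) × PySem.Set (Int × Int) → List (Int × Int) × PySem.Set (Int × Int)
  | 0, _, st => st
  | f + 1, rel, (comp, used) =>
    match pvFindNext rel used comp with
    | none => (comp, used)
    | some t => pvGrow f rel (comp ++ [t], PySem.Set.add used t)

def pvGreedy (rel : List (Int × Int)) : List (List (Int × Int)) :=
  (rel.foldl (fun (st : List (List (Int × Int)) × PySem.Set (Int × Int)) seed =>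
      if PySem.Set.contains st.2 seed then st
      else
        let g := pvGrow (rel.length + 1) rel ([seed], PySem.Set.add st.2 seed)
        (st.1 ++ [g.1], g.2))
    ([], PySem.Set.empty)).1

def return_subsets_alt (gameboard : List (List Int)) (col_x_coords : List Int) (row_y_coords : List Int) (tile : Int × Int) : List (List (Int × Int)) :=
  let rel := pvOffsets.foldl (fun acc d =>
      if pvBordering gameboard col_x_coords row_y_coords (tile.1 + d.1) (tile.2 + d.2) then acc ++ [d] else acc) []
  (pvGreedy rel).map (fun comp => PySem.Set.ofList (comp.map (fun d => (tile.1 + d.1, tile.2 + d.2))))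

-- ===== PRECONDITION & SPEC =====
-- Pre_ excludes exactly the inputs where Python A raises an IndexError: a window cell passes the
-- col/row bounds test but gameboard has no such row, or that row has no such column.
def Pre_return_subsets (gameboard : List (List Int)) (col_x_coords : List Int) (row_y_coords : List Int) (tile : Int × Int) : Prop :=
  ∀ dc ∈ ([-1, 0, 1] : List Int), ∀ dr ∈ ([-1, 0, 1] : List Int),
    (0 ≤ tile.1 + dc ∧ tile.1 + dc < (col_x_coords.length : Int) ∧
     0 ≤ tile.2 + dr ∧ tile.2 + dr < (row_y_coords.length : Int)) →
    ((tile.2 + dr).toNat < gameboard.length ∧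
     (tile.1 + dc).toNat < (gameboard.getD (tile.2 + dr).toNat []).length)
instance (gameboard : List (List Int)) (col_x_coords : List Int) (row_y_coords : List Int) (tile : Int × Int) : Decidable (Pre_return_subsets gameboard col_x_coords row_y_coords tile) := by unfold Pre_return_subsets; infer_instance

def pvWitness_return_subsets : List (List Int) × List Int × List Int × (Int × Int) := ([[-1]], [0], [0], (0, 0))

def Spec_return_subsets (gameboard : List (List Int)) (col_x_coords : List Int) (row_y_coords : List Int) (tile : Int × Int) (out : List (List (Int × Int))) : Prop := out = return_subsets_alt gameboard col_x_coords row_y_coords tile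
instance (gameboard : List (List Int)) (col_x_coords : List Int) (row_y_coords : List Int) (tile : Int × Int) (out : List (List (Int × Int))) : Decidable (Spec_return_subsets gameboard col_x_coords row_y_coords tile out) := by unfold Spec_return_subsets; infer_instance

-- ===== CLAIM (what is proved, stated in full; the proofs are below) =====
def Claim_equal_return_subsets : Prop := ∀ (gameboard : List (List Int)) (col_x_coords : List Int) (row_y_coords : List Int) (tile : Int × Int), Dom_return_subsets gameboard col_x_coords row_y_coords tile → Pre_return_subsets gameboard col_x_coords row_y_coords tile → Spec_return_subsets gameboard col_x_coords row_y_coords tile (return_subsets gameboard col_x_coords row_y_coords tile)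

-- ===== LEMMAS AND PROOFS =====

-- the 512 stencil configurations: A's merge loop and B's greedy growth agree, and B's
-- components are duplicate-free
set_option maxRecDepth 10000 in
theorem pvRelCases : ∀ L ∈ pvOffsets.sublists,
    pvMergeLoop ((L.length + 1) * (L.length + 1)) (L.map (fun d => [d])) 0 = pvGreedy L
    ∧ ∀ c ∈ pvGreedy L, c.Nodup := by decide

theorem pvRange3 (a : Int) : PySem.List.pyRange (a - 1) (a + 2) 1 = [a - 1, a, a + 1] := by
  rw [PySem.List.pyRange_one_cons (by omega), show a - 1 + 1 = a by omega,
      PySem.List.pyRange_one_cons (by omega), PySem.List.pyRange_one_cons (by omega),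
      show a + 1 + 1 = a + 2 by omega, PySem.List.pyRange_one_eq_nil (by omega)]

theorem pvTransInj (t0 t1 : Int) : Function.Injective (fun d : Int × Int => (t0 + d.1, t1 + d.2)) := by
  intro a b h
  simp only [Prod.mk.injEq] at h
  exact Prod.ext (by omega) (by omega)

theorem pvFilterMapFlat {α β : Type} (p : α → Bool) (f : α → β) (l : List α) :
    (l.filter p).map f = l.flatMap (fun x => if p x then [f x] else []) := by
  induction l with
  | nil => rfl
  | cons x xs ih =>
    by_cases h : p x
    · simp [h, ih]
    · simp [h, ih]

-- the singleton-subset scan of A, written as filter-then-map over the stencil offsets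
theorem pvScanEq (g : List (List Int)) (cx ry : List Int) (t0 t1 : Int) :
    (PySem.List.pyRange (t0 - 1) (t0 + 2) 1).foldl (fun acc c =>
        (PySem.List.pyRange (t1 - 1) (t1 + 2) 1).foldl (fun acc r =>
          if pvBordering g cx ry c r then acc ++ [PySem.Set.add PySem.Set.empty (c, r)] else acc) acc) []
      = ((pvOffsets.filter (fun d => pvBordering g cx ry (t0 + d.1) (t1 + d.2))).map
          (fun d => [(t0 + d.1, t1 + d.2)])) := by
  rw [pvRange3, pvRange3]
  simp only [PySem.List.foldl_append_if, PySem.List.foldl_append_eq_flatMap, List.nil_append]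
  rw [pvFilterMapFlat]
  simp only [pvFilterMapFlat]
  have hadd : ∀ x : Int × Int, PySem.Set.add PySem.Set.empty x = [x] := fun _ => rfl
  simp only [hadd, pvOffsets, List.flatMap_cons, List.flatMap_nil, List.append_nil,
    List.append_assoc]
  have hm : ∀ a : Int, a + -1 = a - 1 := fun a => by ring
  have ho : ∀ a : Int, a + 0 = a := fun a => by ring
  simp only [hm, ho]

theorem pvGetDMap (F : List (Int × Int) → List (Int × Int)) (hF : F [] = [])
    (sl : List (List (Int × Int))) (i : Nat) : (sl.map F).getD i [] = F (sl.getD i []) := by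
  conv_lhs => rw [show ([] : List (Int × Int)) = F [] from hF.symm]
  rw [List.getD_map]

theorem pvAdjPairMap (t0 t1 : Int) (t u : Int × Int) :
    ((((t0 + u.1, t1 + u.2) : Int × Int) == (t0 + t.1 + 1, t1 + t.2))
      || (((t0 + u.1, t1 + u.2) : Int × Int) == (t0 + t.1 - 1, t1 + t.2))
      || (((t0 + u.1, t1 + u.2) : Int × Int) == (t0 + t.1, t1 + t.2 + 1))
      || (((t0 + u.1, t1 + u.2) : Int × Int) == (t0 + t.1, t1 + t.2 - 1)))
    = (u == (t.1 + 1, t.2) || u == (t.1 - 1, t.2) || u == (t.1, t.2 + 1) || u == (t.1, t.2 - 1)) := by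
  rw [Bool.eq_iff_iff]
  simp only [Bool.or_eq_true, beq_iff_eq, Prod.ext_iff]
  omega

theorem pvAdjInnerMap (t0 t1 : Int) (t : Int × Int) (T : List (Int × Int)) :
    (T.map (fun d => (t0 + d.1, t1 + d.2))).any (fun u =>
        u == (t0 + t.1 + 1, t1 + t.2) || u == (t0 + t.1 - 1, t1 + t.2)
        || u == (t0 + t.1, t1 + t.2 + 1) || u == (t0 + t.1, t1 + t.2 - 1))
      = T.any (fun u =>
        u == (t.1 + 1, t.2) || u == (t.1 - 1, t.2) || u == (t.1, t.2 + 1) || u == (t.1, t.2 - 1)) := by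
  rw [List.any_map]
  apply PySem.List.any_congr_mem
  intro u _
  exact pvAdjPairMap t0 t1 t u

theorem pvAdjAnyMap (t0 t1 : Int) (S T : List (Int × Int)) :
    pvAdjAny (S.map (fun d => (t0 + d.1, t1 + d.2))) (T.map (fun d => (t0 + d.1, t1 + d.2)))
      = pvAdjAny S T := by
  unfold pvAdjAny
  rw [List.any_map]
  apply PySem.List.any_congr_mem
  intro t _
  exact pvAdjInnerMap t0 t1 t T

theorem pvFindMergeAuxMap (t0 t1 : Int) (sl : List (List (Int × Int))) (idx : Nat) :
    ∀ (k cci : Nat), pvFindMergeAux (sl.map (List.map (fun d => (t0 + d.1, t1 + d.2)))) idx k cci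
      = pvFindMergeAux sl idx k cci := by
  intro k
  induction k with
  | zero => intro cci; rfl
  | succ k ih =>
    intro cci
    unfold pvFindMergeAux
    rw [pvGetDMap (List.map (fun d => (t0 + d.1, t1 + d.2))) rfl,
        pvGetDMap (List.map (fun d => (t0 + d.1, t1 + d.2))) rfl, pvAdjAnyMap, ih]

theorem pvFindMergeMap (t0 t1 : Int) (sl : List (List (Int × Int))) (idx cci : Nat) :
    pvFindMerge (sl.map (List.map (fun d => (t0 + d.1, t1 + d.2)))) idx cci
      = pvFindMerge sl idx cci := by
  unfold pvFindMerge
  rw [List.length_map, pvFindMergeAuxMap]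

theorem pvSetAddMap (t0 t1 : Int) (s : List (Int × Int)) (x : Int × Int) :
    PySem.Set.add (s.map (fun d => (t0 + d.1, t1 + d.2))) ((t0 + x.1, t1 + x.2))
      = (PySem.Set.add s x).map (fun d => (t0 + d.1, t1 + d.2)) := by
  rw [PySem.Set.add_eq_ite, PySem.Set.add_eq_ite]
  by_cases h : x ∈ s
  · rw [if_pos (List.mem_map_of_mem h), if_pos h]
  · rw [if_neg (fun hc => h (by
      obtain ⟨y, hy, he⟩ := List.mem_map.mp hc
      exact (pvTransInj t0 t1 he) ▸ hy)), if_neg h, List.map_append]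
    rfl

theorem pvSetUpdateMap (t0 t1 : Int) (s u : List (Int × Int)) :
    PySem.Set.update (s.map (fun d => (t0 + d.1, t1 + d.2))) (u.map (fun d => (t0 + d.1, t1 + d.2)))
      = (PySem.Set.update s u).map (fun d => (t0 + d.1, t1 + d.2)) := by
  induction u generalizing s with
  | nil => rfl
  | cons x xs ih =>
    rw [List.map_cons, PySem.Set.update_cons, PySem.Set.update_cons, pvSetAddMap, ih]

theorem pvMergeLoopMap (t0 t1 : Int) :
    ∀ (fuel : Nat) (sl : List (List (Int × Int))) (index : Nat),
      pvMergeLoop fuel (sl.map (List.map (fun d => (t0 + d.1, t1 + d.2)))) index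
        = (pvMergeLoop fuel sl index).map (List.map (fun d => (t0 + d.1, t1 + d.2))) := by
  intro fuel
  induction fuel with
  | zero => intro sl index; rfl
  | succ f ih =>
    intro sl index
    unfold pvMergeLoop
    rw [List.length_map, pvFindMergeMap]
    by_cases h : index + 1 < sl.length
    · rw [if_pos h, if_pos h]
      cases pvFindMerge sl index (index + 1) with
      | none => exact ih sl (index + 1)
      | some j =>
        dsimp only
        rw [pvGetDMap (List.map (fun d => (t0 + d.1, t1 + d.2))) rfl,
            pvGetDMap (List.map (fun d => (t0 + d.1, t1 + d.2))) rfl,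
            pvSetUpdateMap, ← List.map_set, List.eraseIdx_map, ih]
    · rw [if_neg h, if_neg h]

theorem pvMainEq (g : List (List Int)) (cx ry : List Int) (tile : Int × Int) :
    return_subsets g cx ry tile = return_subsets_alt g cx ry tile := by
  unfold return_subsets return_subsets_alt
  simp only [pvScanEq, PySem.List.foldl_append_if_eq_filter, List.nil_append, List.length_map]
  obtain ⟨h1, h2⟩ := pvRelCases
    (pvOffsets.filter (fun d => pvBordering g cx ry (tile.1 + d.1) (tile.2 + d.2)))
    (List.mem_sublists.mpr (List.filter_sublist (l := pvOffsets)))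
  have hmm : ((pvOffsets.filter (fun d => pvBordering g cx ry (tile.1 + d.1) (tile.2 + d.2))).map
        (fun d => ([(tile.1 + d.1, tile.2 + d.2)] : List (Int × Int))))
      = ((pvOffsets.filter (fun d => pvBordering g cx ry (tile.1 + d.1) (tile.2 + d.2))).map
          (fun d => [d])).map (List.map (fun d => (tile.1 + d.1, tile.2 + d.2))) := by
    rw [List.map_map]; rfl
  rw [hmm, pvMergeLoopMap, h1]
  apply List.map_congr_left
  intro comp hcomp
  rw [PySem.Set.ofList_eq_self_of_nodup _ ((h2 comp hcomp).map (pvTransInj tile.1 tile.2))]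

-- ===== VERDICT (by name: the statement is the Claim_ definition above) =====
theorem return_subsets_spec : Claim_equal_return_subsets := by
  intro g cx ry tile _ _
  unfold Spec_return_subsets
  exact pvMainEq g cx ry tile
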